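-- pv_equiv track=rewrite | github.com/BlueAlder/advent-of-code-solutions | solutions/day17/part2.py | pushRock
-- ===== SOURCE A (Python) =====
-- def pushRock(direction, rock, rocks, chamber_width):
--   new_position = []
--   for x, y in rock:
--     nx = x + direction
--     if nx < 1 or nx > chamber_width or (nx, y) in rocks:
--       return rock
--     new_position.append((nx, y))
--   return new_position
-- ===== SOURCE B (Python) =====
-- def pushRock(direction, rock, rocks, chamber_width):
--     # extrema + set-intersection: the bounds check collapses to min/max of the
--     # x-coordinates (all cells shift equally), the collision check to a set
--     # intersection of the shifted rock with the settled rocks.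
--     if not rock:
--         return []
--     xs = [x for x, _ in rock]
--     if min(xs) + direction < 1 or max(xs) + direction > chamber_width:
--         return rock
--     shifted = [(x + direction, y) for x, y in rock]
--     if set(shifted) & set(rocks):
--         return rock
--     return shifted
-- ===== Notes on version B (the rewrite author's own statement) =====
-- stated objective: alternative
-- what changed: Replaces A's early-exit per-cell loop (each cell checked against both walls and the rock set while accumulating) with a different strategy: the wall check is done once in closed form on min/max of the x-coordinates, and the collision check becomes a set intersection of the whole shifted rock with the settled rocks; the shifted list is built unconditionally afterwards.
import Mathlib
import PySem

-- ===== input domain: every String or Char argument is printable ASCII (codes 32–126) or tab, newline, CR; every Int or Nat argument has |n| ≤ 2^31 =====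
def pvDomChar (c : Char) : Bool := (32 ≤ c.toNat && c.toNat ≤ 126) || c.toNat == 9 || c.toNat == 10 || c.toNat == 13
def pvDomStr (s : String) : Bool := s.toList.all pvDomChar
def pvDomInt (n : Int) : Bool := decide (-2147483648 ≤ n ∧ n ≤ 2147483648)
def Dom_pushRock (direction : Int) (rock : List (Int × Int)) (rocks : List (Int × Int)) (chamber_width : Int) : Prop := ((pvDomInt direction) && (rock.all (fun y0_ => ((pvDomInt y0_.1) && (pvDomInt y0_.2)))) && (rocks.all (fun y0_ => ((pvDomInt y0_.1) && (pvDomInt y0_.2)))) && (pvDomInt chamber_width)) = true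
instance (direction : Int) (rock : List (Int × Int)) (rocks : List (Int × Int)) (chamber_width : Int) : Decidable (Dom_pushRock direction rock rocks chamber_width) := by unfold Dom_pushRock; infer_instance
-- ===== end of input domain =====

-- B replaces A's early-exit per-cell loop with a closed-form wall check on min/max x and a set-intersection collision check (alternative decomposition, same cost).

-- ===== PORT A =====
-- A's loop with the accumulator `new_position`; early return of `rock` on blockage.
def pushRockGo (direction : Int) (rocks : List (Int × Int)) (chamber_width : Int)
    (orig : List (Int × Int)) : List (Int × Int) → List (Int × Int) → List (Int × Int)
  | [], acc => acc
  | (x, y) :: rest, acc =>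
    let nx := x + direction
    if nx < 1 ∨ nx > chamber_width ∨ (nx, y) ∈ rocks then orig
    else pushRockGo direction rocks chamber_width orig rest (acc ++ [(nx, y)])

def pushRock (direction : Int) (rock : List (Int × Int)) (rocks : List (Int × Int)) (chamber_width : Int) : List (Int × Int) :=
  pushRockGo direction rocks chamber_width rock rock []

-- ===== PORT B =====
-- `min(xs)` / `max(xs)` → PySem.List.min?/max? (some, since rock ≠ []; .getD 0 only discharges the option);
-- `set(shifted) & set(rocks)` truthiness → Set.inter (Set.ofList shifted) rocks ≠ [].
def pushRock_alt (direction : Int) (rock : List (Int × Int)) (rocks : List (Int × Int)) (chamber_width : Int) : List (Int × Int) :=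
  if rock = [] then []
  else
    let xs := rock.map Prod.fst
    let mn := (PySem.List.min? xs (fun x => x)).getD 0
    let mx := (PySem.List.max? xs (fun x => x)).getD 0
    if mn + direction < 1 ∨ mx + direction > chamber_width then rock
    else
      let shifted := rock.map (fun p => (p.1 + direction, p.2))
      if PySem.Set.inter (PySem.Set.ofList shifted) rocks ≠ [] then rock
      else shifted

-- ===== PRECONDITION & SPEC =====
def Spec_pushRock (direction : Int) (rock : List (Int × Int)) (rocks : List (Int × Int)) (chamber_width : Int) (out : List (Int × Int)) : Prop := out = pushRock_alt direction rock rocks chamber_width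
instance (direction : Int) (rock : List (Int × Int)) (rocks : List (Int × Int)) (chamber_width : Int) (out : List (Int × Int)) : Decidable (Spec_pushRock direction rock rocks chamber_width out) := by unfold Spec_pushRock; infer_instance

-- ===== CLAIM =====
def Claim_equal_pushRock : Prop := ∀ (direction : Int) (rock : List (Int × Int)) (rocks : List (Int × Int)) (chamber_width : Int), Dom_pushRock direction rock rocks chamber_width → Spec_pushRock direction rock rocks chamber_width (pushRock direction rock rocks chamber_width)

-- ===== LEMMAS AND PROOFS =====

-- Loop invariant: A's accumulating early-exit loop equals "any blocked? then orig else map".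
theorem pushRockGo_eq (direction : Int) (rocks : List (Int × Int)) (chamber_width : Int)
    (orig : List (Int × Int)) :
    ∀ (rock acc : List (Int × Int)),
      pushRockGo direction rocks chamber_width orig rock acc =
        if ∃ p ∈ rock, p.1 + direction < 1 ∨ p.1 + direction > chamber_width ∨ (p.1 + direction, p.2) ∈ rocks
        then orig
        else acc ++ rock.map (fun p => (p.1 + direction, p.2)) := by
  intro rock
  induction rock with
  | nil => intro acc; simp [pushRockGo]
  | cons hd tl ih =>
    intro acc
    obtain ⟨x, y⟩ := hd
    simp only [pushRockGo]
    by_cases h : x + direction < 1 ∨ x + direction > chamber_width ∨ (x + direction, y) ∈ rocks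
    · rw [if_pos h, if_pos]
      exact ⟨(x, y), List.mem_cons_self, h⟩
    · rw [if_neg h, ih]
      by_cases h2 : ∃ p ∈ tl, p.1 + direction < 1 ∨ p.1 + direction > chamber_width ∨ (p.1 + direction, p.2) ∈ rocks
      · rw [if_pos h2, if_pos]
        obtain ⟨p, hp, hb⟩ := h2
        exact ⟨p, List.mem_cons_of_mem _ hp, hb⟩
      · rw [if_neg h2, if_neg]
        · simp
        · rintro ⟨p, hp, hb⟩
          rcases List.mem_cons.mp hp with rfl | hp'
          · exact h hb
          · exact h2 ⟨p, hp', hb⟩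

-- The intersection is nonempty iff some shifted cell lies in rocks.
theorem inter_ne_nil_iff (shifted rocks : List (Int × Int)) :
    (PySem.Set.inter (PySem.Set.ofList shifted) rocks ≠ []) ↔ ∃ q ∈ shifted, q ∈ rocks := by
  simp only [Ne, List.eq_nil_iff_forall_not_mem, not_forall, not_not,
    PySem.Set.mem_inter, PySem.Set.mem_ofList]

-- ===== VERDICT =====
theorem pushRock_spec : Claim_equal_pushRock := by
  intro direction rock rocks chamber_width _
  unfold Spec_pushRock pushRock pushRock_alt
  rw [pushRockGo_eq]
  cases rock with
  | nil => simp
  | cons h0 t0 =>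
    set rock := h0 :: t0 with hrock
    have hne : rock ≠ [] := by simp [hrock]
    rw [if_neg hne]
    simp only []
    set xs := rock.map Prod.fst with hxs
    have hxsne : xs ≠ [] := by simp [hxs, hrock]
    obtain ⟨mn, hmn⟩ : ∃ m, PySem.List.min? xs (fun x => x) = some m := by
      cases hm : PySem.List.min? xs (fun x => x) with
      | none => exact absurd ((PySem.List.min?_eq_none_iff _ _).mp hm) hxsne
      | some m => exact ⟨m, rfl⟩
    obtain ⟨mx, hmx⟩ : ∃ m, PySem.List.max? xs (fun x => x) = some m := by
      cases hm : PySem.List.max? xs (fun x => x) with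
      | none => exact absurd ((PySem.List.max?_eq_none_iff _ _).mp hm) hxsne
      | some m => exact ⟨m, rfl⟩
    rw [hmn, hmx]
    simp only [Option.getD_some]
    have hmn_mem : mn ∈ xs := PySem.List.min?_mem hmn
    have hmx_mem : mx ∈ xs := PySem.List.max?_mem hmx
    have hmn_min : ∀ z ∈ xs, mn ≤ z := fun z hz => PySem.List.min?_isMin hmn z hz
    have hmx_max : ∀ z ∈ xs, z ≤ mx := fun z hz => PySem.List.max?_isMax hmx z hz
    by_cases hwall : mn + direction < 1 ∨ mx + direction > chamber_width
    · rw [if_pos hwall, if_pos]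
      rcases hwall with hl | hr
      · obtain ⟨p, hp, hp1⟩ := List.mem_map.mp (hxs ▸ hmn_mem)
        exact ⟨p, hp, Or.inl (by rw [hp1]; exact hl)⟩
      · obtain ⟨p, hp, hp1⟩ := List.mem_map.mp (hxs ▸ hmx_mem)
        exact ⟨p, hp, Or.inr (Or.inl (by rw [hp1]; exact hr))⟩
    · rw [if_neg hwall]
      push Not at hwall
      have hnowall : ∀ p ∈ rock, ¬(p.1 + direction < 1) ∧ ¬(p.1 + direction > chamber_width) := by
        intro p hp
        have h1 : mn ≤ p.1 := hmn_min p.1 (hxs ▸ List.mem_map_of_mem hp)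
        have h2 : p.1 ≤ mx := hmx_max p.1 (hxs ▸ List.mem_map_of_mem hp)
        omega
      by_cases hcol : ∃ q ∈ rock.map (fun p => (p.1 + direction, p.2)), q ∈ rocks
      · rw [if_pos ((inter_ne_nil_iff _ _).mpr hcol), if_pos]
        obtain ⟨q, hq, hqr⟩ := hcol
        obtain ⟨p, hp, rfl⟩ := List.mem_map.mp hq
        exact ⟨p, hp, Or.inr (Or.inr hqr)⟩
      · rw [if_neg (fun h => hcol ((inter_ne_nil_iff _ _).mp h)), if_neg]
        · simp
        · rintro ⟨p, hp, hb⟩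
          rcases hb with hb | hb | hb
          · exact (hnowall p hp).1 hb
          · exact (hnowall p hp).2 hb
          · exact hcol ⟨(p.1 + direction, p.2), List.mem_map_of_mem hp, hb⟩
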